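-- pv_equiv track=rewrite | github.com/3LENDERMAN/Python_projects | 04/divisors.py | common_divisors
-- ===== SOURCE A (Python) =====
-- def common_divisors(rows: int, cols: int) -> list[list[int]]:
--     final = []
--     for r_val in range(1, rows + 1):
--         row = []
--         for c_val in range(1, cols + 1):
--             count = 0
--             for x in range(1, max(rows, cols) + 1):
--                 if r_val % x == 0 and c_val % x == 0:
--                     count += 1
--             row.append(count)
--         final.append(row)
--     return final
-- ===== SOURCE B (Python) =====
-- def common_divisors(rows: int, cols: int) -> list[list[int]]:
--     def gcd(a, b):
--         while b:
--             a, b = b, a % b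
--         return a
--
--     def divisor_count(g):
--         n = 0
--         for x in range(1, g + 1):
--             if g % x == 0:
--                 n += 1
--         return n
--
--     return [[divisor_count(gcd(r, c)) for c in range(1, cols + 1)]
--             for r in range(1, rows + 1)]
-- ===== Notes on version B (the rewrite author's own statement) =====
-- stated objective: faster
-- what changed: Per cell, A scans every x in 1..max(rows,cols) testing divisibility of both coordinates; B computes g = gcd(r,c) by Euclid's algorithm and counts the divisors of g by scanning only 1..g.
import Mathlib
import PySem

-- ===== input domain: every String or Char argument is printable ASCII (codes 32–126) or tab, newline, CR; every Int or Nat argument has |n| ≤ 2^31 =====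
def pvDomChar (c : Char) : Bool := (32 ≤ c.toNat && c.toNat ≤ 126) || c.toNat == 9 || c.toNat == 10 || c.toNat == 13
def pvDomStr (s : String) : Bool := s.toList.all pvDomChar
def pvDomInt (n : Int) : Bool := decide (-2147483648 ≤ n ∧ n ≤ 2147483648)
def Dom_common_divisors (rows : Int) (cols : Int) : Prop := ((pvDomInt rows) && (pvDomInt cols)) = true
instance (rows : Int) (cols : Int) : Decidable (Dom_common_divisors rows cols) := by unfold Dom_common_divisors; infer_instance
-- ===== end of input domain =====

-- B replaces A's per-cell scan of 1..max(rows,cols) by Euclid's gcd plus a divisor count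
-- of the (usually much smaller) gcd; objective: faster (smaller inner loop bound).


-- ===== PORT A =====
-- A: three nested loops; the innermost scans x = 1 .. max(rows, cols) and counts common divisors.
def common_divisors (rows : Int) (cols : Int) : List (List Int) :=
  (PySem.List.pyRange 1 (rows + 1) 1).foldl
    (fun final r_val =>
      final ++ [
        (PySem.List.pyRange 1 (cols + 1) 1).foldl
          (fun row c_val =>
            row ++ [
              (PySem.List.pyRange 1 (max rows cols + 1) 1).foldl
                (fun count x =>
                  if PySem.Int.mod r_val x = 0 ∧ PySem.Int.mod c_val x = 0 then count + 1
                  else count) 0 ]) [] ]) []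

-- ===== PORT B =====
-- termination fact for the Euclid loop (Python `a, b = b, a % b`)
theorem pvModNatAbsLt (a b : Int) (hb : b ≠ 0) :
    (PySem.Int.mod a b).natAbs < b.natAbs := by
  rcases lt_or_gt_of_ne hb with h | h
  · have h1 := PySem.Int.mod_neg_bounds a h
    omega
  · have h1 := PySem.Int.mod_nonneg a h
    have h2 := PySem.Int.mod_lt a h
    omega

-- B helper: while b: a, b = b, a % b
def pvGcd (a b : Int) : Int :=
  if hb : b = 0 then a
  else pvGcd b (PySem.Int.mod a b)
termination_by b.natAbs
decreasing_by exact pvModNatAbsLt a b hb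

-- B helper: count the divisors of g by scanning 1 .. g
def pvDivisorCount (g : Int) : Int :=
  (PySem.List.pyRange 1 (g + 1) 1).foldl
    (fun n x => if PySem.Int.mod g x = 0 then n + 1 else n) 0

def common_divisors_alt (rows : Int) (cols : Int) : List (List Int) :=
  (PySem.List.pyRange 1 (rows + 1) 1).map (fun r =>
    (PySem.List.pyRange 1 (cols + 1) 1).map (fun c =>
      pvDivisorCount (pvGcd r c)))

-- ===== PRECONDITION & SPEC =====
def Spec_common_divisors (rows : Int) (cols : Int) (out : List (List Int)) : Prop := out = common_divisors_alt rows cols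
instance (rows : Int) (cols : Int) (out : List (List Int)) : Decidable (Spec_common_divisors rows cols out) := by unfold Spec_common_divisors; infer_instance

-- ===== CLAIM (what is proved, stated in full; the proofs are below) =====
def Claim_equal_common_divisors : Prop := ∀ (rows : Int) (cols : Int), Dom_common_divisors rows cols → Spec_common_divisors rows cols (common_divisors rows cols)

-- ===== LEMMAS AND PROOFS =====

-- characterization of pvGcd: x divides pvGcd a b iff x divides both a and b
theorem pvGcd_dvd_iff_aux (n : Nat) : ∀ (b a x : Int), b.natAbs ≤ n →
    (x ∣ pvGcd a b ↔ x ∣ a ∧ x ∣ b) := by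
  induction n with
  | zero =>
    intro b a x hn
    have hb : b = 0 := by omega
    subst hb; rw [pvGcd]; simp
  | succ n ih =>
    intro b a x hn
    rw [pvGcd]
    split
    · next hb => subst hb; simp
    · next hb =>
      have hlt := pvModNatAbsLt a b hb
      rw [ih (PySem.Int.mod a b) b x (by omega)]
      have hmod : PySem.Int.mod a b = a - b * (PySem.Int.floordiv a b) := by
        have := PySem.Int.floordiv_mul_add_mod a b
        linarith
      constructor
      · rintro ⟨h1, h2⟩
        rw [hmod] at h2
        exact ⟨by have := dvd_add h2 (h1.mul_right (PySem.Int.floordiv a b)); simpa using this, h1⟩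
      · rintro ⟨h1, h2⟩
        exact ⟨h2, by rw [hmod]; exact dvd_sub h1 (h2.mul_right _)⟩

theorem pvGcd_dvd_iff (b a x : Int) : x ∣ pvGcd a b ↔ x ∣ a ∧ x ∣ b :=
  pvGcd_dvd_iff_aux b.natAbs b a x le_rfl

-- positivity of pvGcd for positive first argument
theorem pvGcd_pos_aux (n : Nat) : ∀ (b a : Int), b.natAbs ≤ n → 0 < a → 0 ≤ b →
    0 < pvGcd a b := by
  induction n with
  | zero =>
    intro b a hn ha _
    have hb : b = 0 := by omega
    subst hb; rw [pvGcd]; simpa using ha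
  | succ n ih =>
    intro b a hn ha hb0
    rw [pvGcd]
    split
    · exact ha
    · next hb =>
      have hlt := pvModNatAbsLt a b hb
      have hpos : 0 < b := by omega
      exact ih (PySem.Int.mod a b) b (by omega) hpos (PySem.Int.mod_nonneg a hpos)

theorem pvGcd_pos (b a : Int) (ha : 0 < a) (hb : 0 ≤ b) : 0 < pvGcd a b :=
  pvGcd_pos_aux b.natAbs b a le_rfl ha hb

-- a counting foldl as countP over the same range
theorem foldl_if_prop_count (xs : List Int) (P : Int → Prop) [DecidablePred P] :
    xs.foldl (fun acc x => if P x then acc + 1 else acc) (0 : Int)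
      = (xs.countP (fun x => decide (P x)) : Int) := by
  have h : (fun (acc : Int) x => if P x then acc + 1 else acc)
      = (fun acc x => if (fun y => decide (P y)) x = true then acc + 1 else acc) := by
    funext acc x; by_cases h : P x <;> simp [h]
  rw [h, PySem.List.foldl_count_if]
  simp

-- the inner cell values agree
theorem pvCell_eq (rows cols r c : Int) (hr : 1 ≤ r) (hrr : r ≤ rows)
    (hc : 1 ≤ c) :
    (PySem.List.pyRange 1 (max rows cols + 1) 1).foldl
      (fun count x =>
        if PySem.Int.mod r x = 0 ∧ PySem.Int.mod c x = 0 then count + 1 else count) 0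
      = pvDivisorCount (pvGcd r c) := by
  set g := pvGcd r c with hgdef
  have hgpos : 0 < g := pvGcd_pos c r (by omega) (by omega)
  have hgler : g ≤ r := Int.le_of_dvd (by omega) ((pvGcd_dvd_iff c r g).mp dvd_rfl).1
  have hM : g + 1 ≤ max rows cols + 1 := by
    have : r ≤ max rows cols := le_trans hrr (le_max_left _ _)
    omega
  rw [foldl_if_prop_count, pvDivisorCount, foldl_if_prop_count]
  congr 1
  have hsplit := PySem.List.pyRange_one_append 1 (g + 1) (max rows cols + 1)
    (by omega) hM
  rw [hsplit, List.countP_append]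
  have htail : (PySem.List.pyRange (g + 1) (max rows cols + 1) 1).countP
      (fun x => decide (PySem.Int.mod r x = 0 ∧ PySem.Int.mod c x = 0)) = 0 := by
    rw [List.countP_eq_zero]
    intro x hx
    rw [PySem.List.mem_pyRange_one] at hx
    simp only [decide_eq_true_eq, not_and]
    intro h1 h2
    rw [PySem.Int.mod_eq_zero_iff_dvd] at h1 h2
    have hxg : x ∣ g := (pvGcd_dvd_iff c r x).mpr ⟨h1, h2⟩
    have := Int.le_of_dvd hgpos hxg
    omega
  rw [htail, Nat.add_zero]
  apply List.countP_congr
  intro x hx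
  rw [PySem.List.mem_pyRange_one] at hx
  simp only [decide_eq_true_eq]
  rw [PySem.Int.mod_eq_zero_iff_dvd, PySem.Int.mod_eq_zero_iff_dvd,
    PySem.Int.mod_eq_zero_iff_dvd]
  exact (pvGcd_dvd_iff c r x).symm

-- ===== VERDICT (by name: the statement is the Claim_ definition above) =====
theorem common_divisors_spec : Claim_equal_common_divisors := by
  intro rows cols _
  unfold Spec_common_divisors common_divisors common_divisors_alt
  rw [PySem.List.foldl_append_singleton_eq_map]
  simp only [List.nil_append]
  apply List.map_congr_left
  intro r hr
  rw [PySem.List.mem_pyRange_one] at hr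
  rw [PySem.List.foldl_append_singleton_eq_map]
  simp only [List.nil_append]
  apply List.map_congr_left
  intro c hc
  rw [PySem.List.mem_pyRange_one] at hc
  exact pvCell_eq rows cols r c (by omega) (by omega) (by omega)
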